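-- pv_equiv track=rewrite | github.com/PKULab1806/FairyClaw | fairyclaw/capabilities/code_repair_ops/scripts/repair_apply_unified_patch.py | _changed_line_count
-- ===== SOURCE A (Python) =====
-- def _changed_line_count(before: str, after: str) -> int:
--     before_lines = before.splitlines()
--     after_lines = after.splitlines()
--     max_len = max(len(before_lines), len(after_lines))
--     changed = 0
--     for i in range(max_len):
--         b = before_lines[i] if i < len(before_lines) else None
--         a = after_lines[i] if i < len(after_lines) else None
--         if b != a:
--             changed += 1
--     return changed
-- ===== SOURCE B (Python) =====
-- def _changed_line_count(before: str, after: str) -> int: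
--     rb = before.splitlines()[::-1]
--     ra = after.splitlines()[::-1]
--     changed = 0
--     while rb and ra:
--         if rb.pop() != ra.pop():
--             changed += 1
--     return changed + len(rb) + len(ra)
-- ===== Notes on version B (the rewrite author's own statement) =====
-- stated objective: alternative
-- what changed: Replaces the index loop over range(max_len) with None-padded lookups by two reversed stacks consumed in lockstep with pop(); when one stack empties, the lines left on the other stack are the extra changed lines, so no max(), range(), index arithmetic or None padding remains.
import Mathlib
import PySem

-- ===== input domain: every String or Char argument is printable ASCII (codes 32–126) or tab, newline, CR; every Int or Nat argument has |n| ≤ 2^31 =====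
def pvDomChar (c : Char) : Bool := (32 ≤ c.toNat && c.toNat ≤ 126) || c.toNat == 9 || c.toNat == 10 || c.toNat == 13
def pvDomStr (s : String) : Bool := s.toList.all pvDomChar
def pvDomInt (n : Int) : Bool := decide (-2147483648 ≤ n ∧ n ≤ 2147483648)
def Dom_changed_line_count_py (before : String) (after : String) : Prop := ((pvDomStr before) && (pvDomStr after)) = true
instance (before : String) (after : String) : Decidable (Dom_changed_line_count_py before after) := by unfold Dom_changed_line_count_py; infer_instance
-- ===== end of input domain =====

-- B consumes the two reversed line lists as stacks in lockstep with pop(); the lines left on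
-- the surviving stack are exactly the extra changed lines, so max()/range()/None padding disappear.

-- ===== PORT A =====
def changed_line_count_py (before : String) (after : String) : Int :=
  let before_lines := PySem.Str.splitlines before
  let after_lines := PySem.Str.splitlines after
  let max_len : Int := max (before_lines.length : Int) (after_lines.length : Int)
  (PySem.List.pyRange 0 max_len 1).foldl (fun changed i =>
    let b : Option String := if i < (before_lines.length : Int) then PySem.List.pyGet? before_lines i else none
    let a : Option String := if i < (after_lines.length : Int) then PySem.List.pyGet? after_lines i else none
    if b ≠ a then changed + 1 else changed) 0

-- ===== PORT B =====
-- the 'while rb and ra' loop: each iteration pops the LAST element of each stack (Python pop());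
-- pop? fails exactly when a stack is empty, i.e. when the while-condition is false.
def clcPopLoop (rb ra : List String) (changed : Int) : Int :=
    if h : rb ≠ [] ∧ ra ≠ [] then
      -- rb.pop() / ra.pop(): take the LAST element off each stack
      let b := rb.getLast h.1
      let a := ra.getLast h.2
      clcPopLoop rb.dropLast ra.dropLast (if b ≠ a then changed + 1 else changed)
    else changed + rb.length + ra.length
termination_by rb.length
decreasing_by
  have hz : rb.length ≠ 0 := fun hz => h.1 (List.eq_nil_of_length_eq_zero hz)
  simp [List.length_dropLast]; omega

def changed_line_count_py_alt (before : String) (after : String) : Int :=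
  -- [::-1] is List.reverse (PySem.List.slice?_none_none_neg_one: exact)
  let rb := (PySem.Str.splitlines before).reverse
  let ra := (PySem.Str.splitlines after).reverse
  clcPopLoop rb ra 0

-- ===== PRECONDITION & SPEC =====
def Spec_changed_line_count_py (before : String) (after : String) (out : Int) : Prop := out = changed_line_count_py_alt before after
instance (before : String) (after : String) (out : Int) : Decidable (Spec_changed_line_count_py before after out) := by unfold Spec_changed_line_count_py; infer_instance

-- ===== CLAIM (what is proved, stated in full; the proofs are below) =====
def Claim_equal_changed_line_count_py : Prop := ∀ (before : String) (after : String), Dom_changed_line_count_py before after → Spec_changed_line_count_py before after (changed_line_count_py before after)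

-- ===== LEMMAS AND PROOFS =====

-- counting mismatching padded positions over range(max) = max - number of equal zipped positions
lemma pv_neqcount (bl al : List String) :
    ((List.range (max bl.length al.length)).countP fun i => decide (bl[i]? ≠ al[i]?))
      = max bl.length al.length - (bl.zip al).countP (fun p => p.1 == p.2) := by
  induction bl generalizing al with
  | nil =>
    cases al with
    | nil => simp
    | cons a al =>
      simp only [List.zip_nil_left, List.countP_nil, Nat.sub_zero, List.length_nil,
        List.length_cons, Nat.max_eq_right (Nat.zero_le _)]
      conv_rhs => rw [← List.length_range (n := al.length + 1)]
      rw [List.countP_eq_length]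
      intro i hi
      simp only [List.mem_range] at hi
      simp [List.getElem?_eq_getElem (show i < (a :: al).length by simpa using hi)]
  | cons b bl ih =>
    cases al with
    | nil =>
      simp only [List.zip_nil_right, List.countP_nil, Nat.sub_zero, List.length_nil,
        List.length_cons, Nat.max_eq_left (Nat.zero_le _)]
      conv_rhs => rw [← List.length_range (n := bl.length + 1)]
      rw [List.countP_eq_length]
      intro i hi
      simp only [List.mem_range] at hi
      simp [List.getElem?_eq_getElem (show i < (b :: bl).length by simpa using hi)]
    | cons a al =>
      have hb : (b :: bl).zip (a :: al) = (b, a) :: bl.zip al := rfl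
      have hmax : max (b :: bl).length (a :: al).length = max bl.length al.length + 1 := by
        simp [Nat.succ_max_succ]
      rw [hmax, hb, List.range_succ_eq_map, List.countP_cons, List.countP_map, List.countP_cons]
      have hzle : (bl.zip al).countP (fun p => p.1 == p.2) ≤ max bl.length al.length := by
        have h1 := List.countP_le_length (l := bl.zip al) (p := fun p => p.1 == p.2)
        simp only [List.length_zip] at h1
        omega
      have hcomp : (List.countP ((fun i => decide ((b :: bl)[i]? ≠ (a :: al)[i]?)) ∘ Nat.succ)
          (List.range (max bl.length al.length)))
          = (List.range (max bl.length al.length)).countP fun i => decide (bl[i]? ≠ al[i]?) := by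
        apply List.countP_congr
        intro i _
        simp
      rw [hcomp, ih al]
      by_cases h : b = a <;> simp [h] <;> omega

-- A's padded index loop computes max(len,len) - (number of equal zipped positions)
lemma pv_a_eq_max_sub (bl al : List String) :
    (PySem.List.pyRange 0 (max (bl.length : Int) (al.length : Int)) 1).foldl (fun changed i =>
        let b : Option String := if i < (bl.length : Int) then PySem.List.pyGet? bl i else none
        let a : Option String := if i < (al.length : Int) then PySem.List.pyGet? al i else none
        if b ≠ a then changed + 1 else changed) (0 : Int)
      = (max bl.length al.length : Int) - ((bl.zip al).countP (fun p => p.1 == p.2) : Nat) := by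
  have hcast : max (bl.length : Int) (al.length : Int) = ((max bl.length al.length : Nat) : Int) := by
    push_cast; rfl
  rw [hcast, PySem.List.pyRange_zero_natCast, List.foldl_map]
  have hfold : (List.range (max bl.length al.length)).foldl (fun changed (i : Nat) =>
      let b : Option String := if (i : Int) < (bl.length : Int) then PySem.List.pyGet? bl (i : Int) else none
      let a : Option String := if (i : Int) < (al.length : Int) then PySem.List.pyGet? al (i : Int) else none
      if b ≠ a then changed + 1 else changed) (0 : Int)
      = (List.range (max bl.length al.length)).foldl (fun changed (i : Nat) =>
        if bl[i]? ≠ al[i]? then changed + 1 else changed) (0 : Int) := by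
    apply PySem.List.foldl_congr_mem
    intro changed i _
    have h1 : (if (i : Int) < (bl.length : Int) then PySem.List.pyGet? bl (i : Int) else none) = bl[i]? := by
      by_cases h : i < bl.length
      · simp [h]
      · have h' : ¬ ((i : Int) < (bl.length : Int)) := by exact_mod_cast h
        rw [if_neg h', List.getElem?_eq_none (show bl.length ≤ i by omega)]
    have h2 : (if (i : Int) < (al.length : Int) then PySem.List.pyGet? al (i : Int) else none) = al[i]? := by
      by_cases h : i < al.length
      · simp [h]
      · have h' : ¬ ((i : Int) < (al.length : Int)) := by exact_mod_cast h
        rw [if_neg h', List.getElem?_eq_none (show al.length ≤ i by omega)]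
    simp only [h1, h2]
  rw [hfold, PySem.List.foldl_ite_add_one, pv_neqcount]
  have hzle : (bl.zip al).countP (fun p => p.1 == p.2) ≤ max bl.length al.length := by
    have h1 := List.countP_le_length (l := bl.zip al) (p := fun p => p.1 == p.2)
    simp only [List.length_zip] at h1
    omega
  push_cast [Nat.cast_sub hzle]
  ring

-- B's lockstep stack consumption computes the same quantity
lemma pv_poploop (bl : List String) : ∀ (al : List String) (c : Int),
    clcPopLoop bl.reverse al.reverse c
      = c + (max bl.length al.length : Int) - ((bl.zip al).countP (fun p => p.1 == p.2) : Nat) := by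
  induction bl with
  | nil =>
    intro al c
    rw [clcPopLoop.eq_def]
    simp
  | cons b bl ih =>
    intro al c
    cases al with
    | nil =>
      rw [clcPopLoop.eq_def]
      simp
      omega
    | cons a al =>
      rw [clcPopLoop.eq_def]
      rw [dif_pos (⟨by simp, by simp⟩ : (b :: bl).reverse ≠ [] ∧ (a :: al).reverse ≠ [])]
      simp only [List.reverse_cons, List.getLast_concat, List.dropLast_concat]
      rw [ih al]
      have hzle : (bl.zip al).countP (fun p => p.1 == p.2) ≤ max bl.length al.length := by
        have h1 := List.countP_le_length (l := bl.zip al) (p := fun p => p.1 == p.2)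
        simp only [List.length_zip] at h1
        omega
      have hz : (b :: bl).zip (a :: al) = (b, a) :: bl.zip al := rfl
      rw [hz, List.countP_cons]
      by_cases h : b = a <;> simp [h] <;> omega

-- ===== VERDICT (by name: the statement is the Claim_ definition above) =====
theorem changed_line_count_py_spec : Claim_equal_changed_line_count_py := by
  intro before after _
  unfold Spec_changed_line_count_py changed_line_count_py changed_line_count_py_alt
  rw [pv_a_eq_max_sub, pv_poploop]
  ring
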